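-- pv_equiv track=rewrite | github.com/uploading1111000/WordleCpp | main.py | getColours
-- ===== SOURCE A (Python) =====
-- def getColours(answer,guess):
--     rAnswer = list(answer)
--     rGuess = list(guess)
--     greens = set()
--     yellows = set()
--     for i in range(5):
--         if rAnswer[i] == rGuess[i]:
--             greens.add(i)
--             rAnswer[i] = '.'
--             rGuess[i] = '.'
--     for i in range(5):
--         if rGuess[i] == '.':
--             continue
--         for j in range(5):
--             if rGuess[i] == rAnswer[j]:
--                 rGuess[i] = '.'
--                 rAnswer[j] = '.'
--                 yellows.add(i)
--     colours = [-1 for i in range(5)]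
--     for i in range(5):
--         if i in greens:
--             colours[i] = 2
--         elif i in yellows:
--             colours[i] = 1
--         else:
--             colours[i] = 0
--     return colours
-- ===== SOURCE B (Python) =====
-- def getColours(answer, guess):
--     a = list(answer)
--     g = list(guess)
--     green = [a[i] == g[i] for i in range(5)]
--     avail = {}
--     for i in range(5):
--         if not green[i]:
--             avail[a[i]] = avail.get(a[i], 0) + 1
--     colours = []
--     for i in range(5):
--         if green[i]:
--             colours.append(2)
--         elif avail.get(g[i], 0) > 0:
--             colours.append(1)
--             avail[g[i]] -= 1
--         else:
--             colours.append(0)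
--     return colours
-- ===== Notes on version B (the rewrite author's own statement) =====
-- stated objective: idiomatic
-- what changed: Replaces A's in-band '.'-sentinel mutation with nested answer rescans by the standard two-pass Wordle colouring: mark greens, bank the remaining answer letters in a dict of counts, then colour left-to-right consuming counts.
-- intended difference: When the guess has a literal '.' at a non-matching position and the answer also has a literal '.' at a non-matching position, A returns 0 (grey) for that guess position because '.' collides with its consumed-cell sentinel, while B returns the intended 1 (yellow) for a letter present elsewhere in the answer. — e.g. on getColours(".abcd", "x.xyz"): A returns [0, 0, 0, 0, 0], B returns [0, 1, 0, 0, 0]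
import Mathlib
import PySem

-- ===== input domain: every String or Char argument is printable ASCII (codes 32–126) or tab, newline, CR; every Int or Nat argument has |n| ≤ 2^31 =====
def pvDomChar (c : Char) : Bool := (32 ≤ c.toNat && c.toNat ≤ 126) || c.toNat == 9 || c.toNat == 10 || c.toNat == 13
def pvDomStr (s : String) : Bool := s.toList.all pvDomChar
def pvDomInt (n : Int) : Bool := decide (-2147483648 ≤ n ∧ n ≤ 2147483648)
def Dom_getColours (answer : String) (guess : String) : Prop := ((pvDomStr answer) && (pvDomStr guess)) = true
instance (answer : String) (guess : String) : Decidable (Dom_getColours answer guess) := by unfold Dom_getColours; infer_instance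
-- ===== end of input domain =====

-- B replaces A's sentinel-marking nested scans by one pass that banks the non-green answer
-- letters in a dict of remaining counts and a second pass that consumes them (idiomatic Wordle
-- colouring); return values agree except on the '.'-sentinel collision inputs stated at D_.


-- ===== PORT A =====
-- state: (rAnswer, rGuess, greens/yellows).  Indexing/assignment is at the Int indices of
-- range(5); Pre_ guarantees they are in range, so `pyGetD _ _ ' '` (read) and `List.set i.toNat`
-- (assignment) are exact there (Python would raise IndexError outside Pre_).
def aGreenStep (st : List Char × List Char × PySem.Set Int) (i : Int) :
    List Char × List Char × PySem.Set Int :=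
  if PySem.List.pyGetD st.1 i ' ' = PySem.List.pyGetD st.2.1 i ' ' then
    (st.1.set i.toNat '.', st.2.1.set i.toNat '.', PySem.Set.add st.2.2 i)
  else st

def aYellowInner (i : Int) (st : List Char × List Char × PySem.Set Int) (j : Int) :
    List Char × List Char × PySem.Set Int :=
  if PySem.List.pyGetD st.2.1 i ' ' = PySem.List.pyGetD st.1 j ' ' then
    (st.1.set j.toNat '.', st.2.1.set i.toNat '.', PySem.Set.add st.2.2 i)
  else st

def aYellowStep (st : List Char × List Char × PySem.Set Int) (i : Int) :
    List Char × List Char × PySem.Set Int :=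
  if PySem.List.pyGetD st.2.1 i ' ' = '.' then st
  else (PySem.List.pyRange 0 5).foldl (aYellowInner i) st

def aColourStep (gr ys : PySem.Set Int) (cols : List Int) (i : Int) : List Int :=
  if PySem.Set.contains gr i then cols.set i.toNat 2
  else if PySem.Set.contains ys i then cols.set i.toNat 1
  else cols.set i.toNat 0

def getColours (answer : String) (guess : String) : List Int :=
  let s1 := (PySem.List.pyRange 0 5).foldl aGreenStep
              (answer.toList, guess.toList, PySem.Set.empty)
  let s2 := (PySem.List.pyRange 0 5).foldl aYellowStep (s1.1, s1.2.1, PySem.Set.empty)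
  (PySem.List.pyRange 0 5).foldl (aColourStep s1.2.2 s2.2.2)
    ((PySem.List.pyRange 0 5).map fun _ => (-1 : Int))

-- ===== PORT B =====
-- Source B: greens as a bool list, remaining non-green answer letters as a dict of counts,
-- colours built left to right by append.
def bAvailStep (a : List Char) (green : List Bool) (d : PySem.Dict Char Int) (i : Int) :
    PySem.Dict Char Int :=
  if !(PySem.List.pyGetD green i false) then
    d.insert (PySem.List.pyGetD a i ' ') (d.getD (PySem.List.pyGetD a i ' ') 0 + 1)
  else d

def bColourStep (g : List Char) (green : List Bool) (st : PySem.Dict Char Int × List Int)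
    (i : Int) : PySem.Dict Char Int × List Int :=
  if PySem.List.pyGetD green i false then (st.1, st.2 ++ [2])
  else if 0 < st.1.getD (PySem.List.pyGetD g i ' ') 0 then
    (st.1.insert (PySem.List.pyGetD g i ' ') (st.1.getD (PySem.List.pyGetD g i ' ') 0 - 1),
     st.2 ++ [1])
  else (st.1, st.2 ++ [0])

def getColours_alt (answer : String) (guess : String) : List Int :=
  let a := answer.toList
  let g := guess.toList
  let green := (PySem.List.pyRange 0 5).map
    (fun i => PySem.List.pyGetD a i ' ' == PySem.List.pyGetD g i ' ')
  let avail := (PySem.List.pyRange 0 5).foldl (bAvailStep a green) PySem.Dict.empty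
  ((PySem.List.pyRange 0 5).foldl (bColourStep g green) (avail, [])).2

-- ===== PRECONDITION & SPEC =====
-- Pre_ excludes exactly the inputs where Python A raises IndexError: a string shorter than 5.
def Pre_getColours (answer : String) (guess : String) : Prop :=
  5 ≤ answer.toList.length ∧ 5 ≤ guess.toList.length
instance (answer : String) (guess : String) : Decidable (Pre_getColours answer guess) := by
  unfold Pre_getColours; infer_instance

def pvWitness_getColours : String × String := ("crane", "trace")

-- A uses '.' as an in-band "consumed" sentinel, so when the guess has a literal '.' at a
-- non-matching position while the answer also has a literal '.' at a non-matching position,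
-- A returns 0 (grey) for that guess '.', whereas B returns the intended yellow for it.
def D_getColours (answer : String) (guess : String) : Prop :=
  (∃ i, i < 5 ∧ answer.toList.getD i ' ' ≠ guess.toList.getD i ' ' ∧
            guess.toList.getD i ' ' = '.') ∧
  (∃ j, j < 5 ∧ answer.toList.getD j ' ' ≠ guess.toList.getD j ' ' ∧
            answer.toList.getD j ' ' = '.')
instance (answer : String) (guess : String) : Decidable (D_getColours answer guess) := by
  unfold D_getColours; infer_instance

def Spec_getColours (answer : String) (guess : String) (out : List Int) : Prop :=
  ¬ D_getColours answer guess → out = getColours_alt answer guess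
instance (answer : String) (guess : String) (out : List Int) :
    Decidable (Spec_getColours answer guess out) := by unfold Spec_getColours; infer_instance

def pvDiffWitness_getColours : String × String := (".abcd", "x.xyz")
def pvDiffWitnessOut_getColours : (List Int) × (List Int) := ([0, 0, 0, 0, 0], [0, 1, 0, 0, 0])

-- ===== CLAIM (what is proved, stated in full; the proofs are below) =====
def Claim_unchanged_getColours : Prop := ∀ (answer : String) (guess : String),
  Dom_getColours answer guess → Pre_getColours answer guess →
    Spec_getColours answer guess (getColours answer guess)
def Claim_changed_getColours : Prop :=
  Dom_getColours (pvDiffWitness_getColours.1) (pvDiffWitness_getColours.2) ∧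
  Pre_getColours (pvDiffWitness_getColours.1) (pvDiffWitness_getColours.2) ∧
  D_getColours (pvDiffWitness_getColours.1) (pvDiffWitness_getColours.2) ∧
  getColours (pvDiffWitness_getColours.1) (pvDiffWitness_getColours.2) =
    pvDiffWitnessOut_getColours.1 ∧
  getColours_alt (pvDiffWitness_getColours.1) (pvDiffWitness_getColours.2) =
    pvDiffWitnessOut_getColours.2 ∧
  pvDiffWitnessOut_getColours.1 ≠ pvDiffWitnessOut_getColours.2
def Claim_exact_getColours : Prop := ∀ (answer : String) (guess : String),
  Dom_getColours answer guess → Pre_getColours answer guess → D_getColours answer guess →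
    getColours answer guess ≠ getColours_alt answer guess


-- ===== LEMMAS AND PROOFS =====

-- [0, 1, 2, 3, 4], the literal index list of range(5)
theorem range5 : PySem.List.pyRange 0 5 = [0, 1, 2, 3, 4] := by decide

-- setting a position to the character it already holds is a no-op
theorem setSelf (l : List Char) (n : Nat) (h : l.getD n ' ' = '.') : l.set n '.' = l := by
  have hn : n < l.length := by
    by_contra hh
    rw [List.getD, List.getElem?_eq_none (by omega : l.length ≤ n)] at h
    simp at h
  apply List.ext_getElem?
  intro m
  rw [List.getElem?_set]
  split
  · rename_i hm
    subst hm
    rw [List.getD, List.getElem?_eq_getElem hn] at h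
    simp only [Option.getD_some] at h
    rw [List.getElem?_eq_getElem hn, h]
  · rfl

theorem getD_set_ne (l : List Char) (n m : Nat) (v : Char) (h : n ≠ m) (d : Char) :
    (l.set n v).getD m d = l.getD m d := by
  simp [List.getD, List.getElem?_set_ne h]

theorem getD_set_self (l : List Char) (n : Nat) (v : Char) (hn : n < l.length) (d : Char) :
    (l.set n v).getD n d = v := by
  simp [List.getD, List.getElem?_set, hn]

-- count of positions 0..4 of ra that hold c
def cnt5 (c : Char) (ra : List Char) : Int :=
  ((List.range 5).countP (fun j => ra.getD j ' ' == c) : Int)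

theorem countP_update (p q : Nat → Bool) (m : Nat) (hqp : ∀ k, k ≠ m → q k = p k) (N : Nat)
    (hm : m < N) :
    (List.range N).countP q + (if p m then 1 else 0) =
      (List.range N).countP p + (if q m then 1 else 0) := by
  induction N with
  | zero => omega
  | succ N ih =>
    rw [List.range_succ, List.countP_append, List.countP_append]
    by_cases hmN : m = N
    · subst hmN
      have heq : (List.range m).countP q = (List.range m).countP p := by
        apply List.countP_congr
        intro k hk
        rw [hqp k (by simp at hk; omega)]
      simp only [List.countP_cons, List.countP_nil, heq]
      by_cases h1 : p m <;> by_cases h2 : q m <;> simp [h1, h2]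
    · have hih := ih (by omega)
      have hN : q N = p N := hqp N (by omega)
      simp only [List.countP_cons, List.countP_nil, hN]
      omega

theorem cnt5_set (c c' : Char) (ra : List Char) (n : Nat) (hn : n < 5) (hlen : 5 ≤ ra.length)
    (hra : ra.getD n ' ' = c) :
    cnt5 c' (ra.set n '.') + (if c = c' then 1 else 0) =
      cnt5 c' ra + (if '.' = c' then 1 else 0) := by
  unfold cnt5
  have h := countP_update (fun j => ra.getD j ' ' == c') (fun j => (ra.set n '.').getD j ' ' == c')
    n (fun k hk => by simp [List.getD, List.getElem?_set_ne (Ne.symm hk)]) 5 hn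
  have h1 : (ra.set n '.').getD n ' ' = '.' := by
    have : n < ra.length := by omega
    simp [List.getD, List.getElem?_set, this]
  simp only [h1, hra, beq_iff_eq] at h
  split_ifs at h ⊢ <;> omega

-- once rGuess[i] is '.', and i is already recorded yellow, the rest of the inner scan is a no-op
theorem innerDone (i : Int) (hi : 0 ≤ i) (J : List Int) (hJ : ∀ j ∈ J, 0 ≤ j)
    (st : List Char × List Char × PySem.Set Int)
    (hdot : st.2.1.getD i.toNat ' ' = '.') (hmem : i ∈ st.2.2) :
    J.foldl (aYellowInner i) st = st := by
  induction J with
  | nil => rfl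
  | cons j J ih =>
    have hj : 0 ≤ j := hJ j (by simp)
    have hstep : aYellowInner i st j = st := by
      unfold aYellowInner
      rw [PySem.List.pyGetD_of_nonneg _ _ hi, PySem.List.pyGetD_of_nonneg _ _ hj, hdot]
      split
      · rename_i hcond
        have h1 : st.1.set j.toNat '.' = st.1 := setSelf _ _ hcond.symm
        have h2 : st.2.1.set i.toNat '.' = st.2.1 := setSelf _ _ hdot
        have h3 : PySem.Set.add st.2.2 i = st.2.2 := PySem.Set.add_of_mem hmem
        rw [h1, h2, h3]
      · rfl
    rw [List.foldl_cons, hstep]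
    exact ih (fun j hj' => hJ j (by simp [hj']))

-- the inner scan consumes the first matching answer slot, if any
theorem innerSpec (i : Int) (hi : 0 ≤ i) (J : List Int) (hJ : ∀ j ∈ J, 0 ≤ j)
    (ra rg : List Char) (ys : PySem.Set Int) (hil : i.toNat < rg.length)
    (hc : rg.getD i.toNat ' ' ≠ '.') :
    J.foldl (aYellowInner i) (ra, rg, ys) =
      match J.find? (fun j => ra.getD j.toNat ' ' == rg.getD i.toNat ' ') with
      | none => (ra, rg, ys)
      | some j => (ra.set j.toNat '.', rg.set i.toNat '.', PySem.Set.add ys i) := by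
  induction J with
  | nil => rfl
  | cons j J ih =>
    have hj : 0 ≤ j := hJ j (by simp)
    by_cases hcond : ra.getD j.toNat ' ' = rg.getD i.toNat ' '
    · have hstep : aYellowInner i (ra, rg, ys) j =
          (ra.set j.toNat '.', rg.set i.toNat '.', PySem.Set.add ys i) := by
        unfold aYellowInner
        rw [PySem.List.pyGetD_of_nonneg _ _ hi, PySem.List.pyGetD_of_nonneg _ _ hj]
        simp only [hcond.symm, if_true, if_pos rfl]
      rw [List.foldl_cons, hstep]
      rw [innerDone i hi J (fun j hj' => hJ j (by simp [hj'])) _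
        (by simp [List.getD, List.getElem?_set, hil]) (by simp [PySem.Set.mem_add])]
      rw [List.find?_cons_of_pos (by simp only [beq_iff_eq]; exact hcond)]
    · have hstep : aYellowInner i (ra, rg, ys) j = (ra, rg, ys) := by
        unfold aYellowInner
        rw [PySem.List.pyGetD_of_nonneg _ _ hi, PySem.List.pyGetD_of_nonneg _ _ hj]
        rw [if_neg (fun hh => hcond hh.symm)]
      rw [List.foldl_cons, hstep, List.find?_cons_of_neg (by simp only [beq_iff_eq]; simpa using hcond)]
      exact ih (fun j hj' => hJ j (by simp [hj']))

theorem inner_ys_mem (i : Int) (J : List Int) (st : List Char × List Char × PySem.Set Int)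
    (x : Int) (h : x ∈ (J.foldl (aYellowInner i) st).2.2) : x ∈ st.2.2 ∨ x = i := by
  induction J generalizing st with
  | nil => exact Or.inl h
  | cons j J ih =>
    rw [List.foldl_cons] at h
    rcases ih _ h with h' | h'
    · unfold aYellowInner at h'
      split at h'
      · simp only [PySem.Set.mem_add] at h'
        tauto
      · tauto
    · tauto

theorem inner_ys_mono (i : Int) (J : List Int) (st : List Char × List Char × PySem.Set Int)
    (x : Int) (h : x ∈ st.2.2) : x ∈ (J.foldl (aYellowInner i) st).2.2 := by
  induction J generalizing st with
  | nil => exact h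
  | cons j J ih =>
    rw [List.foldl_cons]
    apply ih
    unfold aYellowInner
    split
    · simp only [PySem.Set.mem_add]; tauto
    · exact h

theorem outer_ys_mono (L : List Int) (st : List Char × List Char × PySem.Set Int) (x : Int)
    (h : x ∈ st.2.2) : x ∈ (L.foldl aYellowStep st).2.2 := by
  induction L generalizing st with
  | nil => exact h
  | cons i L ih =>
    rw [List.foldl_cons]
    apply ih
    unfold aYellowStep
    split
    · exact h
    · exact inner_ys_mono i _ st x h

theorem outer_ys_mem (L : List Int) (st : List Char × List Char × PySem.Set Int) (x : Int)
    (h : x ∉ L) : x ∈ (L.foldl aYellowStep st).2.2 ↔ x ∈ st.2.2 := by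
  induction L generalizing st with
  | nil => rfl
  | cons i L ih =>
    rw [List.foldl_cons]
    rw [ih _ (fun hx => h (by simp [hx]))]
    unfold aYellowStep
    split
    · rfl
    · constructor
      · intro hx
        rcases inner_ys_mem i _ st x hx with h' | h'
        · exact h'
        · exact absurd (h' ▸ (by simp : i ∈ i :: L)) h
      · exact inner_ys_mono i _ st x

-- the first marking pass, characterised per position
theorem pass1Spec (L : List Int) (hL : (L.map Int.toNat).Nodup) (hpos : ∀ i ∈ L, 0 ≤ i)
    (ra rg : List Char) (gr : PySem.Set Int)
    (hbd : ∀ i ∈ L, i.toNat < ra.length ∧ i.toNat < rg.length) :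
    ((L.foldl aGreenStep (ra, rg, gr)).1.length = ra.length ∧
      (L.foldl aGreenStep (ra, rg, gr)).2.1.length = rg.length) ∧
    (∀ k : Nat,
      (L.foldl aGreenStep (ra, rg, gr)).1.getD k ' ' =
        if (∃ i ∈ L, i.toNat = k) ∧ ra.getD k ' ' = rg.getD k ' ' then '.' else ra.getD k ' ') ∧
    (∀ k : Nat,
      (L.foldl aGreenStep (ra, rg, gr)).2.1.getD k ' ' =
        if (∃ i ∈ L, i.toNat = k) ∧ ra.getD k ' ' = rg.getD k ' ' then '.' else rg.getD k ' ') ∧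
    (∀ x : Int, x ∈ (L.foldl aGreenStep (ra, rg, gr)).2.2 ↔
        x ∈ gr ∨ (x ∈ L ∧ ra.getD x.toNat ' ' = rg.getD x.toNat ' ')) := by
  induction L generalizing ra rg gr with
  | nil => simp
  | cons i L ih =>
    have hi : 0 ≤ i := hpos i (by simp)
    have hbi := hbd i (by simp)
    have hmap : (Int.toNat i :: List.map Int.toNat L).Nodup := by simpa using hL
    have hnotin : i.toNat ∉ L.map Int.toNat := (List.nodup_cons.mp hmap).1
    have hL' : (L.map Int.toNat).Nodup := (List.nodup_cons.mp hmap).2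
    rw [List.foldl_cons]
    by_cases hgr : ra.getD i.toNat ' ' = rg.getD i.toNat ' '
    · have hstep : aGreenStep (ra, rg, gr) i =
          (ra.set i.toNat '.', rg.set i.toNat '.', PySem.Set.add gr i) := by
        unfold aGreenStep
        rw [PySem.List.pyGetD_of_nonneg _ _ hi, PySem.List.pyGetD_of_nonneg _ _ hi, if_pos hgr]
      rw [hstep]
      obtain ⟨⟨len1, len2⟩, ha, hg, hs⟩ := ih hL' (fun j hj => hpos j (by simp [hj]))
        (ra.set i.toNat '.') (rg.set i.toNat '.') (PySem.Set.add gr i)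
        (fun j hj => by
          have := hbd j (by simp [hj]); simpa using this)
      refine ⟨⟨by simpa using len1, by simpa using len2⟩, ?_, ?_, ?_⟩
      · intro k
        rw [ha k]
        by_cases hk : i.toNat = k
        · subst hk
          have hnot : ¬ (∃ j ∈ L, j.toNat = i.toNat) := by
            rintro ⟨j, hj, hjk⟩
            exact hnotin (by simpa [hjk] using List.mem_map_of_mem (f := Int.toNat) hj)
          rw [if_neg (fun hh => hnot hh.1)]
          rw [getD_set_self _ _ _ hbi.1]
          rw [if_pos ⟨⟨i, by simp⟩, hgr⟩]
        · rw [getD_set_ne _ _ _ _ hk, getD_set_ne _ _ _ _ hk]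
          by_cases hex : (∃ j ∈ L, j.toNat = k) ∧ ra.getD k ' ' = rg.getD k ' '
          · rw [if_pos hex, if_pos ⟨⟨hex.1.choose, by
              have := hex.1.choose_spec; exact ⟨by simp [this.1], this.2⟩⟩, hex.2⟩]
          · rw [if_neg hex]
            by_cases hex2 : (∃ j ∈ i :: L, j.toNat = k) ∧ ra.getD k ' ' = rg.getD k ' '
            · exfalso
              obtain ⟨⟨j, hj, hjk⟩, he⟩ := hex2
              rcases List.mem_cons.mp hj with rfl | hj'
              · exact hk hjk
              · exact hex ⟨⟨j, hj', hjk⟩, he⟩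
            · rw [if_neg hex2]
      · intro k
        rw [hg k]
        by_cases hk : i.toNat = k
        · subst hk
          have hnot : ¬ (∃ j ∈ L, j.toNat = i.toNat) := by
            rintro ⟨j, hj, hjk⟩
            exact hnotin (by simpa [hjk] using List.mem_map_of_mem (f := Int.toNat) hj)
          rw [if_neg (fun hh => hnot hh.1)]
          rw [getD_set_self _ _ _ hbi.2]
          rw [if_pos ⟨⟨i, by simp⟩, hgr⟩]
        · rw [getD_set_ne _ _ _ _ hk, getD_set_ne _ _ _ _ hk]
          by_cases hex : (∃ j ∈ L, j.toNat = k) ∧ ra.getD k ' ' = rg.getD k ' '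
          · rw [if_pos hex, if_pos ⟨⟨hex.1.choose, by
              have := hex.1.choose_spec; exact ⟨by simp [this.1], this.2⟩⟩, hex.2⟩]
          · rw [if_neg hex]
            by_cases hex2 : (∃ j ∈ i :: L, j.toNat = k) ∧ ra.getD k ' ' = rg.getD k ' '
            · exfalso
              obtain ⟨⟨j, hj, hjk⟩, he⟩ := hex2
              rcases List.mem_cons.mp hj with rfl | hj'
              · exact hk hjk
              · exact hex ⟨⟨j, hj', hjk⟩, he⟩
            · rw [if_neg hex2]
      · intro x
        rw [hs x]
        simp only [PySem.Set.mem_add, List.mem_cons]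
        constructor
        · rintro (⟨hx | rfl⟩ | ⟨hx, he⟩)
          · tauto
          · exact Or.inr ⟨Or.inl rfl, hgr⟩
          · have hxk : x.toNat ≠ i.toNat := by
              intro hh
              exact hnotin (hh ▸ List.mem_map_of_mem (f := Int.toNat) hx)
            rw [getD_set_ne _ _ _ _ (Ne.symm hxk), getD_set_ne _ _ _ _ (Ne.symm hxk)] at he
            exact Or.inr ⟨Or.inr hx, he⟩
        · rintro (hx | ⟨rfl | hx, he⟩)
          · tauto
          · exact Or.inl (Or.inr rfl)
          · have hxk : x.toNat ≠ i.toNat := by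
              intro hh
              exact hnotin (hh ▸ List.mem_map_of_mem (f := Int.toNat) hx)
            rw [← getD_set_ne ra _ _ '.' (Ne.symm hxk) ' ', ← getD_set_ne rg _ _ '.' (Ne.symm hxk) ' '] at he
            exact Or.inr ⟨hx, he⟩
    · have hstep : aGreenStep (ra, rg, gr) i = (ra, rg, gr) := by
        unfold aGreenStep
        rw [PySem.List.pyGetD_of_nonneg _ _ hi, PySem.List.pyGetD_of_nonneg _ _ hi, if_neg hgr]
      rw [hstep]
      obtain ⟨hlen, ha, hg, hs⟩ := ih hL' (fun j hj => hpos j (by simp [hj])) ra rg gr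
        (fun j hj => hbd j (by simp [hj]))
      refine ⟨hlen, ?_, ?_, ?_⟩
      · intro k
        rw [ha k]
        by_cases hex : (∃ j ∈ L, j.toNat = k) ∧ ra.getD k ' ' = rg.getD k ' '
        · rw [if_pos hex, if_pos ⟨⟨hex.1.choose, by
            have := hex.1.choose_spec; exact ⟨by simp [this.1], this.2⟩⟩, hex.2⟩]
        · rw [if_neg hex]
          by_cases hex2 : (∃ j ∈ i :: L, j.toNat = k) ∧ ra.getD k ' ' = rg.getD k ' '
          · exfalso
            obtain ⟨⟨j, hj, hjk⟩, he⟩ := hex2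
            rcases List.mem_cons.mp hj with rfl | hj'
            · exact hgr (hjk ▸ he)
            · exact hex ⟨⟨j, hj', hjk⟩, he⟩
          · rw [if_neg hex2]
      · intro k
        rw [hg k]
        by_cases hex : (∃ j ∈ L, j.toNat = k) ∧ ra.getD k ' ' = rg.getD k ' '
        · rw [if_pos hex, if_pos ⟨⟨hex.1.choose, by
            have := hex.1.choose_spec; exact ⟨by simp [this.1], this.2⟩⟩, hex.2⟩]
        · rw [if_neg hex]
          by_cases hex2 : (∃ j ∈ i :: L, j.toNat = k) ∧ ra.getD k ' ' = rg.getD k ' '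
          · exfalso
            obtain ⟨⟨j, hj, hjk⟩, he⟩ := hex2
            rcases List.mem_cons.mp hj with rfl | hj'
            · exact hgr (hjk ▸ he)
            · exact hex ⟨⟨j, hj', hjk⟩, he⟩
          · rw [if_neg hex2]
      · intro x
        rw [hs x]
        simp only [List.mem_cons]
        constructor
        · rintro (hx | ⟨hx, he⟩)
          · tauto
          · exact Or.inr ⟨Or.inr hx, he⟩
        · rintro (hx | ⟨rfl | hx, he⟩)
          · tauto
          · exact absurd he hgr
          · exact Or.inr ⟨hx, he⟩

-- the dict of available letters counts the admitted positions
theorem availSpec (a : List Char) (green : List Bool) (L : List Int) (hb : ∀ i ∈ L, 0 ≤ i)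
    (d : PySem.Dict Char Int) (c : Char) :
    (L.foldl (bAvailStep a green) d).getD c 0 =
      d.getD c 0 +
        (L.countP (fun i => !(green.getD i.toNat false) && (a.getD i.toNat ' ' == c)) : Int) := by
  induction L generalizing d with
  | nil => simp
  | cons i L ih =>
    have hi : 0 ≤ i := hb i (by simp)
    rw [List.foldl_cons]
    rw [ih (fun j hj => hb j (by simp [hj]))]
    unfold bAvailStep
    simp only [PySem.List.pyGetD_of_nonneg _ _ hi]
    rw [List.countP_cons]
    by_cases hgl : green.getD i.toNat false = true
    · rw [if_neg (by simp only [hgl, Bool.not_true]; exact Bool.false_ne_true)]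
      simp only [hgl, Bool.not_true, Bool.false_and, if_neg (Bool.false_ne_true)]
      push_cast
      ring
    · have hgl' : green.getD i.toNat false = false := by simpa using hgl
      rw [if_pos (by simp only [hgl', Bool.not_false])]
      rw [PySem.Dict.getD_insert]
      by_cases hac : a.getD i.toNat ' ' = c
      · rw [if_pos hac.symm, hac]
        simp only [hgl', Bool.not_false, Bool.true_and, beq_self_eq_true, if_pos rfl]
        push_cast
        ring
      · rw [if_neg (fun hh => hac hh.symm)]
        simp only [hgl', Bool.not_false, Bool.true_and, beq_iff_eq, if_neg hac]
        push_cast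
        ring

theorem greenSpec (a g : List Char) (k : Nat) (hk : k < 5) :
    ((PySem.List.pyRange 0 5).map
        (fun i => PySem.List.pyGetD a i ' ' == PySem.List.pyGetD g i ' ')).getD k false =
      (a.getD k ' ' == g.getD k ' ') := by
  have h5 : PySem.List.pyRange 0 5 = [0, 1, 2, 3, 4] := by decide
  rw [h5]
  interval_cases k <;>
    simp [List.getD, PySem.List.pyGetD_of_nonneg]

-- the main simultaneous induction: B's colour pass produces exactly A's colours
theorem mem5 (j : Int) (h : j ∈ ([0, 1, 2, 3, 4] : List Int)) : 0 ≤ j ∧ j.toNat < 5 := by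
  fin_cases h <;> decide

theorem nat5mem (k : Nat) (hk : k < 5) : (k : Int) ∈ ([0, 1, 2, 3, 4] : List Int) := by
  interval_cases k <;> decide

theorem cnt5_pos (c : Char) (ra : List Char) (n : Nat) (hn : n < 5)
    (hra : ra.getD n ' ' = c) : 0 < cnt5 c ra := by
  unfold cnt5
  have : 0 < (List.range 5).countP (fun j => ra.getD j ' ' == c) := by
    rw [List.countP_pos_iff]
    exact ⟨n, by simp [hn], by simp only [beq_iff_eq]; exact hra⟩
  exact_mod_cast this

theorem cnt5_zero (c : Char) (ra : List Char)
    (h : ∀ k : Nat, k < 5 → ra.getD k ' ' ≠ c) : cnt5 c ra = 0 := by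
  unfold cnt5
  have : (List.range 5).countP (fun j => ra.getD j ' ' == c) = 0 := by
    rw [List.countP_eq_zero]
    intro k hk
    simp only [List.mem_range] at hk
    simp only [beq_iff_eq]
    exact h k hk
  rw [this]
  rfl

-- the main simultaneous induction: B's colour pass produces exactly A's colours
theorem mainSpec (g : List Char) (green : List Bool) (gl : Nat → Bool)
    (Hgr : ∀ k, k < 5 → green.getD k false = gl k)
    (L : List Int) (hL : (L.map Int.toNat).Nodup) (hbd : ∀ i ∈ L, 0 ≤ i ∧ i.toNat < 5)
    (ra rg : List Char) (ys : PySem.Set Int) (cnt : PySem.Dict Char Int) (cols : List Int)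
    (hlen : 5 ≤ ra.length) (hlig : 5 ≤ rg.length)
    (H1 : ∀ c : Char, c ≠ '.' → cnt.getD c 0 = cnt5 c ra)
    (H2 : ∀ i ∈ L, rg.getD i.toNat ' ' = if gl i.toNat then '.' else g.getD i.toNat ' ')
    (H3 : ∀ i ∈ L, i ∉ ys)
    (H5 : cnt.getD '.' 0 = 0 ∨ ∀ i ∈ L, gl i.toNat = false → g.getD i.toNat ' ' ≠ '.') :
    (L.foldl (bColourStep g green) (cnt, cols)).2 =
      cols ++ L.map (fun i => if gl i.toNat then (2 : Int)
        else if i ∈ (L.foldl aYellowStep (ra, rg, ys)).2.2 then 1 else 0) := by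
  induction L generalizing ra rg ys cnt cols with
  | nil => simp
  | cons i L ih =>
    obtain ⟨hi, hi5⟩ := hbd i (by simp)
    have hmap : (Int.toNat i :: List.map Int.toNat L).Nodup := by simpa using hL
    have hnotin : i.toNat ∉ L.map Int.toNat := (List.nodup_cons.mp hmap).1
    have hL' : (L.map Int.toNat).Nodup := (List.nodup_cons.mp hmap).2
    have hiL : i ∉ L := fun hx => hnotin (List.mem_map_of_mem hx)
    have hne_toNat : ∀ i' ∈ L, i'.toNat ≠ i.toNat := by
      intro i' hi'
      intro hh
      exact hnotin (hh ▸ List.mem_map_of_mem hi')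
    have hne_int : ∀ i' ∈ L, i' ≠ i := by
      intro i' hi' hh
      exact hiL (hh ▸ hi')
    have hrg : rg.getD i.toNat ' ' =
        if gl i.toNat then '.' else g.getD i.toNat ' ' := H2 i (by simp)
    have hgreen : PySem.List.pyGetD green i false = gl i.toNat := by
      rw [PySem.List.pyGetD_of_nonneg _ _ hi]
      exact Hgr i.toNat hi5
    rw [List.foldl_cons, List.foldl_cons]
    by_cases hgl : gl i.toNat = true
    · -- green position: A skips, B appends 2
      have hskip : aYellowStep (ra, rg, ys) i = (ra, rg, ys) := by
        unfold aYellowStep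
        rw [PySem.List.pyGetD_of_nonneg _ _ hi, hrg, if_pos hgl, if_pos rfl]
      have hb : bColourStep g green (cnt, cols) i = (cnt, cols ++ [2]) := by
        unfold bColourStep
        rw [hgreen, if_pos hgl]
      rw [hskip, hb]
      rw [ih hL' (fun j hj => hbd j (by simp [hj])) ra rg ys cnt (cols ++ [2]) hlen hlig H1
        (fun j hj => H2 j (by simp [hj])) (fun j hj => H3 j (by simp [hj]))
        (H5.imp id (fun h j hj => h j (by simp [hj])))]
      simp [hgl]
    · have hglf : gl i.toNat = false := by simpa using hgl
      have hrgc : rg.getD i.toNat ' ' = g.getD i.toNat ' ' := by rw [hrg, if_neg hgl]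
      by_cases hdot : g.getD i.toNat ' ' = '.'
      · -- guess '.' at a non-green position: A skips, B sees count 0 (H5)
        have hcnt0 : cnt.getD '.' 0 = 0 := by
          rcases H5 with h | h
          · exact h
          · exact absurd hdot (h i (by simp) hglf)
        have hskip : aYellowStep (ra, rg, ys) i = (ra, rg, ys) := by
          unfold aYellowStep
          rw [PySem.List.pyGetD_of_nonneg _ _ hi, hrgc, if_pos hdot]
        have hb : bColourStep g green (cnt, cols) i = (cnt, cols ++ [0]) := by
          unfold bColourStep
          rw [hgreen, if_neg (by simp [hglf]), PySem.List.pyGetD_of_nonneg _ _ hi, hdot, hcnt0,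
            if_neg (by omega)]
        rw [hskip, hb]
        rw [ih hL' (fun j hj => hbd j (by simp [hj])) ra rg ys cnt (cols ++ [0]) hlen hlig H1
          (fun j hj => H2 j (by simp [hj])) (fun j hj => H3 j (by simp [hj]))
          (H5.imp id (fun h j hj => h j (by simp [hj])))]
        have hmem : i ∉ (L.foldl aYellowStep (ra, rg, ys)).2.2 := by
          rw [outer_ys_mem L _ i hiL]
          exact H3 i (by simp)
        simp [hglf, hmem]
      · -- ordinary non-green letter: both consult the multiset of remaining answer letters
        set c := g.getD i.toNat ' ' with hc_def
        have hAstep : aYellowStep (ra, rg, ys) i =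
            match ([0, 1, 2, 3, 4] : List Int).find?
                (fun j => ra.getD j.toNat ' ' == c) with
            | none => (ra, rg, ys)
            | some j => (ra.set j.toNat '.', rg.set i.toNat '.', PySem.Set.add ys i) := by
          unfold aYellowStep
          rw [PySem.List.pyGetD_of_nonneg _ _ hi, hrgc, if_neg hdot, range5]
          have h0 := innerSpec i hi ([0, 1, 2, 3, 4] : List Int) (fun j hj => (mem5 j hj).1)
            ra rg ys (by omega) (by rw [hrgc]; exact hdot)
          rw [hrgc] at h0
          exact h0
        have hcntc : cnt.getD c 0 = cnt5 c ra := H1 c hdot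
        rcases hfind : ([0, 1, 2, 3, 4] : List Int).find?
            (fun j => ra.getD j.toNat ' ' == c) with _ | j
        · -- no available answer letter: A leaves the state, B appends 0
          have hnone : ∀ k : Nat, k < 5 → ra.getD k ' ' ≠ c := by
            intro k hk hcontra
            have := List.find?_eq_none.mp hfind (k : Int) (nat5mem k hk)
            simp only [Int.toNat_natCast, beq_iff_eq] at this
            exact this hcontra
          have hzero : cnt5 c ra = 0 := cnt5_zero c ra hnone
          have hb : bColourStep g green (cnt, cols) i = (cnt, cols ++ [0]) := by
            unfold bColourStep
            rw [hgreen, if_neg (by simp [hglf]), PySem.List.pyGetD_of_nonneg _ _ hi, ← hc_def,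
              hcntc, hzero]
            rw [if_neg (by show ¬ (0:Int) < (0:Int); omega)]
          rw [hAstep, hfind, hb]
          rw [ih hL' (fun j hj => hbd j (by simp [hj])) ra rg ys cnt (cols ++ [0]) hlen hlig H1
            (fun j hj => H2 j (by simp [hj])) (fun j hj => H3 j (by simp [hj]))
            (H5.imp id (fun h j hj => h j (by simp [hj])))]
          have hmem : i ∉ (L.foldl aYellowStep (ra, rg, ys)).2.2 := by
            rw [outer_ys_mem L _ i hiL]
            exact H3 i (by simp)
          simp [hglf, hmem]
        · -- a matching answer letter: A consumes its first slot, B decrements the count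
          obtain ⟨hj, hj5⟩ := mem5 j (List.mem_of_find?_eq_some hfind)
          have hpj : ra.getD j.toNat ' ' = c := by
            have := List.find?_some hfind
            simpa using this
          have hpos : 0 < cnt5 c ra := cnt5_pos c ra j.toNat hj5 hpj
          have hb : bColourStep g green (cnt, cols) i =
              (cnt.insert c (cnt.getD c 0 - 1), cols ++ [1]) := by
            unfold bColourStep
            rw [hgreen, if_neg (by simp [hglf])]
            rw [PySem.List.pyGetD_of_nonneg _ _ hi, ← hc_def]
            rw [if_pos (by show (0:Int) < cnt.getD c 0; omega)]
          rw [hAstep, hfind, hb]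
          have H1' : ∀ c' : Char, c' ≠ '.' →
              (cnt.insert c (cnt.getD c 0 - 1)).getD c' 0 = cnt5 c' (ra.set j.toNat '.') := by
            intro c' hc'
            have hset := cnt5_set c c' ra j.toNat hj5 hlen hpj
            rw [PySem.Dict.getD_insert]
            by_cases hcc : c' = c
            · subst hcc
              rw [if_pos rfl, if_neg (fun hh => hc' hh.symm)] at hset
              rw [if_pos rfl, hcntc]
              omega
            · rw [if_neg (fun hh => hcc hh.symm), if_neg (fun hh => hc' hh.symm)] at hset
              rw [if_neg hcc, H1 c' hc']
              omega
          rw [ih hL' (fun j' hj' => hbd j' (by simp [hj']))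
            (ra.set j.toNat '.') (rg.set i.toNat '.') (PySem.Set.add ys i)
            (cnt.insert c (cnt.getD c 0 - 1)) (cols ++ [1])
            (by simpa using hlen) (by simpa using hlig) H1'
            (fun i' hi' => by
              rw [getD_set_ne _ _ _ _ (fun hh => hne_toNat i' hi' hh.symm)]
              exact H2 i' (by simp [hi']))
            (fun i' hi' => by
              rw [PySem.Set.mem_add]
              rintro (hh | hh)
              · exact H3 i' (by simp [hi']) hh
              · exact hne_int i' hi' hh)
            (by
              refine H5.imp (fun h => ?_) (fun h j' hj' => h j' (by simp [hj']))
              rw [PySem.Dict.getD_insert, if_neg (fun hh => hdot hh.symm)]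
              exact h)]
          have hmem : i ∈ (L.foldl aYellowStep
              (ra.set j.toNat '.', rg.set i.toNat '.', PySem.Set.add ys i)).2.2 := by
            apply outer_ys_mono
            simp [PySem.Set.mem_add]
          simp [hglf, hmem]

theorem bPrefix (g : List Char) (green : List Bool) (L : List Int)
    (cnt : PySem.Dict Char Int) (cols : List Int) :
    ∃ rest, (L.foldl (bColourStep g green) (cnt, cols)).2 = cols ++ rest := by
  induction L generalizing cnt cols with
  | nil => exact ⟨[], by simp⟩
  | cons i L ih =>
    rw [List.foldl_cons]
    unfold bColourStep
    split
    · obtain ⟨rest, hr⟩ := ih cnt (cols ++ [2])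
      exact ⟨[2] ++ rest, by simpa using hr⟩
    · split
      · obtain ⟨rest, hr⟩ := ih _ (cols ++ [1])
        exact ⟨[1] ++ rest, by simpa using hr⟩
      · obtain ⟨rest, hr⟩ := ih cnt (cols ++ [0])
        exact ⟨[0] ++ rest, by simpa using hr⟩

-- inside D_, B diverges from A's colours: at the first non-green '.' of the guess the
-- remaining count of '.' is still positive, so B writes 1 where A wrote 0
theorem bDiverge (g : List Char) (green : List Bool) (gl : Nat → Bool)
    (Hgr : ∀ k, k < 5 → green.getD k false = gl k)
    (L : List Int) (hL : (L.map Int.toNat).Nodup) (hbd : ∀ i ∈ L, 0 ≤ i ∧ i.toNat < 5)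
    (ra rg : List Char) (ys : PySem.Set Int) (cnt : PySem.Dict Char Int) (cols : List Int)
    (hlen : 5 ≤ ra.length) (hlig : 5 ≤ rg.length)
    (H1 : ∀ c : Char, c ≠ '.' → cnt.getD c 0 = cnt5 c ra)
    (H2 : ∀ i ∈ L, rg.getD i.toNat ' ' = if gl i.toNat then '.' else g.getD i.toNat ' ')
    (H3 : ∀ i ∈ L, i ∉ ys)
    (hpos : 0 < cnt.getD '.' 0)
    (hdotL : ∃ i ∈ L, gl i.toNat = false ∧ g.getD i.toNat ' ' = '.') :
    (L.foldl (bColourStep g green) (cnt, cols)).2 ≠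
      cols ++ L.map (fun i => if gl i.toNat then (2 : Int)
        else if i ∈ (L.foldl aYellowStep (ra, rg, ys)).2.2 then 1 else 0) := by
  induction L generalizing ra rg ys cnt cols with
  | nil => obtain ⟨i, hi, _⟩ := hdotL; exact absurd hi (List.not_mem_nil)
  | cons i L ih =>
    obtain ⟨hi, hi5⟩ := hbd i (by simp)
    have hmap : (Int.toNat i :: List.map Int.toNat L).Nodup := by simpa using hL
    have hnotin : i.toNat ∉ L.map Int.toNat := (List.nodup_cons.mp hmap).1
    have hL' : (L.map Int.toNat).Nodup := (List.nodup_cons.mp hmap).2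
    have hiL : i ∉ L := fun hx => hnotin (List.mem_map_of_mem hx)
    have hne_toNat : ∀ i' ∈ L, i'.toNat ≠ i.toNat := by
      intro i' hi' hh
      exact hnotin (hh ▸ List.mem_map_of_mem hi')
    have hne_int : ∀ i' ∈ L, i' ≠ i := by
      intro i' hi' hh
      exact hiL (hh ▸ hi')
    have hrg : rg.getD i.toNat ' ' =
        if gl i.toNat then '.' else g.getD i.toNat ' ' := H2 i (by simp)
    have hgreen : PySem.List.pyGetD green i false = gl i.toNat := by
      rw [PySem.List.pyGetD_of_nonneg _ _ hi]
      exact Hgr i.toNat hi5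
    rw [List.foldl_cons, List.foldl_cons]
    by_cases hgl : gl i.toNat = true
    · -- green head: both sides put 2, the divergence is in the tail
      have hskip : aYellowStep (ra, rg, ys) i = (ra, rg, ys) := by
        unfold aYellowStep
        rw [PySem.List.pyGetD_of_nonneg _ _ hi, hrg, if_pos hgl, if_pos rfl]
      have hb : bColourStep g green (cnt, cols) i = (cnt, cols ++ [2]) := by
        unfold bColourStep
        rw [hgreen, if_pos hgl]
      rw [hskip, hb]
      have hdotL' : ∃ i' ∈ L, gl i'.toNat = false ∧ g.getD i'.toNat ' ' = '.' := by
        obtain ⟨i', hi', hglf', hd'⟩ := hdotL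
        rcases List.mem_cons.mp hi' with rfl | hmem
        · rw [hglf'] at hgl; exact absurd hgl (by simp)
        · exact ⟨i', hmem, hglf', hd'⟩
      have hih := ih hL' (fun j hj => hbd j (by simp [hj])) ra rg ys cnt (cols ++ [2])
        hlen hlig H1 (fun j hj => H2 j (by simp [hj])) (fun j hj => H3 j (by simp [hj]))
        hpos hdotL'
      intro hcontra
      apply hih
      rw [hcontra]
      simp [hgl]
    · have hglf : gl i.toNat = false := by simpa using hgl
      have hrgc : rg.getD i.toNat ' ' = g.getD i.toNat ' ' := by rw [hrg, if_neg hgl]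
      by_cases hdot : g.getD i.toNat ' ' = '.'
      · -- the divergence point: A writes 0, B writes 1, the tails are whatever they are
        have hskip : aYellowStep (ra, rg, ys) i = (ra, rg, ys) := by
          unfold aYellowStep
          rw [PySem.List.pyGetD_of_nonneg _ _ hi, hrgc, if_pos hdot]
        have hb : bColourStep g green (cnt, cols) i =
            (cnt.insert '.' (cnt.getD '.' 0 - 1), cols ++ [1]) := by
          unfold bColourStep
          rw [hgreen, if_neg (by simp [hglf]), PySem.List.pyGetD_of_nonneg _ _ hi, hdot]
          rw [if_pos (by show (0:Int) < cnt.getD '.' 0; omega)]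
        rw [hskip, hb]
        have hmem : i ∉ (L.foldl aYellowStep (ra, rg, ys)).2.2 := by
          rw [outer_ys_mem L _ i hiL]
          exact H3 i (by simp)
        obtain ⟨rest, hr⟩ := bPrefix g green L (cnt.insert '.' (cnt.getD '.' 0 - 1)) (cols ++ [1])
        rw [hr]
        simp only [hglf, Bool.false_eq_true, if_false, if_neg hmem, List.map_cons]
        intro hcontra
        rw [List.append_assoc] at hcontra
        have h := List.append_cancel_left hcontra
        simp at h
      · -- an ordinary letter: heads agree (same argument as mainSpec), recurse on the tail
        set c := g.getD i.toNat ' ' with hc_def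
        have hAstep : aYellowStep (ra, rg, ys) i =
            match ([0, 1, 2, 3, 4] : List Int).find?
                (fun j => ra.getD j.toNat ' ' == c) with
            | none => (ra, rg, ys)
            | some j => (ra.set j.toNat '.', rg.set i.toNat '.', PySem.Set.add ys i) := by
          unfold aYellowStep
          rw [PySem.List.pyGetD_of_nonneg _ _ hi, hrgc, if_neg hdot, range5]
          have h0 := innerSpec i hi ([0, 1, 2, 3, 4] : List Int) (fun j hj => (mem5 j hj).1)
            ra rg ys (by omega) (by rw [hrgc]; exact hdot)
          rw [hrgc] at h0
          exact h0
        have hcntc : cnt.getD c 0 = cnt5 c ra := H1 c hdot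
        have hdotL' : ∃ i' ∈ L, gl i'.toNat = false ∧ g.getD i'.toNat ' ' = '.' := by
          obtain ⟨i', hi', hglf', hd'⟩ := hdotL
          rcases List.mem_cons.mp hi' with rfl | hmem
          · exact absurd hd' hdot
          · exact ⟨i', hmem, hglf', hd'⟩
        rcases hfind : ([0, 1, 2, 3, 4] : List Int).find?
            (fun j => ra.getD j.toNat ' ' == c) with _ | j
        · have hnone : ∀ k : Nat, k < 5 → ra.getD k ' ' ≠ c := by
            intro k hk hcontra
            have := List.find?_eq_none.mp hfind (k : Int) (nat5mem k hk)
            simp only [Int.toNat_natCast, beq_iff_eq] at this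
            exact this hcontra
          have hzero : cnt5 c ra = 0 := cnt5_zero c ra hnone
          have hb : bColourStep g green (cnt, cols) i = (cnt, cols ++ [0]) := by
            unfold bColourStep
            rw [hgreen, if_neg (by simp [hglf]), PySem.List.pyGetD_of_nonneg _ _ hi, ← hc_def,
              hcntc, hzero]
            rw [if_neg (by show ¬ (0:Int) < (0:Int); omega)]
          rw [hAstep, hfind, hb]
          have hmem : i ∉ (L.foldl aYellowStep (ra, rg, ys)).2.2 := by
            rw [outer_ys_mem L _ i hiL]
            exact H3 i (by simp)
          have hih := ih hL' (fun j hj => hbd j (by simp [hj])) ra rg ys cnt (cols ++ [0])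
            hlen hlig H1 (fun j hj => H2 j (by simp [hj])) (fun j hj => H3 j (by simp [hj]))
            hpos hdotL'
          intro hcontra
          apply hih
          rw [hcontra]
          simp [hglf, hmem]
        · obtain ⟨hj, hj5⟩ := mem5 j (List.mem_of_find?_eq_some hfind)
          have hpj : ra.getD j.toNat ' ' = c := by
            have := List.find?_some hfind
            simpa using this
          have hposc : 0 < cnt5 c ra := cnt5_pos c ra j.toNat hj5 hpj
          have hb : bColourStep g green (cnt, cols) i =
              (cnt.insert c (cnt.getD c 0 - 1), cols ++ [1]) := by
            unfold bColourStep
            rw [hgreen, if_neg (by simp [hglf])]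
            rw [PySem.List.pyGetD_of_nonneg _ _ hi, ← hc_def]
            rw [if_pos (by show (0:Int) < cnt.getD c 0; omega)]
          rw [hAstep, hfind, hb]
          have H1' : ∀ c' : Char, c' ≠ '.' →
              (cnt.insert c (cnt.getD c 0 - 1)).getD c' 0 = cnt5 c' (ra.set j.toNat '.') := by
            intro c' hc'
            have hset := cnt5_set c c' ra j.toNat hj5 hlen hpj
            rw [PySem.Dict.getD_insert]
            by_cases hcc : c' = c
            · subst hcc
              rw [if_pos rfl, if_neg (fun hh => hc' hh.symm)] at hset
              rw [if_pos rfl, hcntc]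
              omega
            · rw [if_neg (fun hh => hcc hh.symm), if_neg (fun hh => hc' hh.symm)] at hset
              rw [if_neg hcc, H1 c' hc']
              omega
          have hpos' : 0 < (cnt.insert c (cnt.getD c 0 - 1)).getD '.' 0 := by
            rw [PySem.Dict.getD_insert, if_neg (fun hh => hdot hh.symm)]
            exact hpos
          have hih := ih hL' (fun j' hj' => hbd j' (by simp [hj']))
            (ra.set j.toNat '.') (rg.set i.toNat '.') (PySem.Set.add ys i)
            (cnt.insert c (cnt.getD c 0 - 1)) (cols ++ [1])
            (by simpa using hlen) (by simpa using hlig) H1'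
            (fun i' hi' => by
              rw [getD_set_ne _ _ _ _ (fun hh => hne_toNat i' hi' hh.symm)]
              exact H2 i' (by simp [hi']))
            (fun i' hi' => by
              rw [PySem.Set.mem_add]
              rintro (hh | hh)
              · exact H3 i' (by simp [hi']) hh
              · exact hne_int i' hi' hh)
            hpos' hdotL'
          have hmem : i ∈ (L.foldl aYellowStep
              (ra.set j.toNat '.', rg.set i.toNat '.', PySem.Set.add ys i)).2.2 := by
            apply outer_ys_mono
            simp [PySem.Set.mem_add]
          intro hcontra
          apply hih
          rw [hcontra]
          simp [hglf, hmem]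

theorem aColourStep_set (gr ys : PySem.Set Int) (cols : List Int) (i : Int) :
    aColourStep gr ys cols i = cols.set i.toNat
      (if PySem.Set.contains gr i then 2 else if PySem.Set.contains ys i then 1 else 0) := by
  unfold aColourStep
  split_ifs <;> rfl

theorem colourFold (gr ys : PySem.Set Int) :
    (PySem.List.pyRange 0 5).foldl (aColourStep gr ys)
        ((PySem.List.pyRange 0 5).map fun _ => (-1 : Int)) =
      ([0, 1, 2, 3, 4] : List Int).map
        (fun i => if PySem.Set.contains gr i then 2
          else if PySem.Set.contains ys i then 1 else 0) := by
  simp only [range5, List.foldl_cons, List.foldl_nil, aColourStep_set, List.map_cons,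
    List.map_nil]
  rfl

-- ===== VERDICT (by name: the statement is the Claim_ definition above) =====
set_option maxHeartbeats 2000000 in
theorem getColours_spec : Claim_unchanged_getColours := by
  unfold Claim_unchanged_getColours Spec_getColours Pre_getColours
  intro answer guess _ hpre hnd
  obtain ⟨ha, hg⟩ := hpre
  unfold D_getColours at hnd
  unfold getColours getColours_alt
  rw [colourFold]
  simp only [range5]
  -- abbreviations (all definitional)
  have hbd5 : ∀ i ∈ ([0, 1, 2, 3, 4] : List Int), 0 ≤ i ∧ i.toNat < 5 := fun i hi => mem5 i hi
  obtain ⟨⟨len1, len2⟩, hra1, hrg1, hG⟩ :=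
    pass1Spec ([0, 1, 2, 3, 4] : List Int) (by decide)
      (by intro i hi; exact (mem5 i hi).1) answer.toList guess.toList PySem.Set.empty
      (by intro i hi; exact ⟨by have := (mem5 i hi).2; omega, by have := (mem5 i hi).2; omega⟩)
  have Hgr : ∀ k, k < 5 →
      (([0, 1, 2, 3, 4] : List Int).map
        (fun i => PySem.List.pyGetD answer.toList i ' ' == PySem.List.pyGetD guess.toList i ' ')).getD k false =
      (answer.toList.getD k ' ' == guess.toList.getD k ' ') := by
    have h := fun k hk => greenSpec answer.toList guess.toList k hk
    simpa only [range5] using h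
  -- the dict of available letters, characterised
  have hav : ∀ c : Char,
      (([0, 1, 2, 3, 4] : List Int).foldl
        (bAvailStep answer.toList
          (([0, 1, 2, 3, 4] : List Int).map
            (fun i => PySem.List.pyGetD answer.toList i ' ' == PySem.List.pyGetD guess.toList i ' ')))
        PySem.Dict.empty).getD c 0 =
      (((List.range 5).countP (fun k =>
        !(answer.toList.getD k ' ' == guess.toList.getD k ' ') &&
          (answer.toList.getD k ' ' == c))) : Int) := by
    intro c
    rw [availSpec _ _ ([0, 1, 2, 3, 4] : List Int) (by intro i hi; exact (mem5 i hi).1)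
      PySem.Dict.empty c]
    have hcongr : (([0, 1, 2, 3, 4] : List Int).countP (fun i =>
        !((([0, 1, 2, 3, 4] : List Int).map
            (fun i => PySem.List.pyGetD answer.toList i ' ' == PySem.List.pyGetD guess.toList i ' ')).getD i.toNat false) &&
          (answer.toList.getD i.toNat ' ' == c))) =
        ((List.range 5).countP (fun k =>
          !(answer.toList.getD k ' ' == guess.toList.getD k ' ') &&
            (answer.toList.getD k ' ' == c))) := by
      simp only [show (List.range 5) = [0, 1, 2, 3, 4] from rfl, List.countP_cons,
        List.countP_nil, show ((0 : Int)).toNat = 0 from rfl, show ((1 : Int)).toNat = 1 from rfl,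
        show ((2 : Int)).toNat = 2 from rfl, show ((3 : Int)).toNat = 3 from rfl,
        show ((4 : Int)).toNat = 4 from rfl, Hgr 0 (by omega), Hgr 1 (by omega),
        Hgr 2 (by omega), Hgr 3 (by omega), Hgr 4 (by omega)]
    rw [hcongr]
    simp
  -- initial count invariant
  have H1 : ∀ c : Char, c ≠ '.' →
      (([0, 1, 2, 3, 4] : List Int).foldl
        (bAvailStep answer.toList
          (([0, 1, 2, 3, 4] : List Int).map
            (fun i => PySem.List.pyGetD answer.toList i ' ' == PySem.List.pyGetD guess.toList i ' ')))
        PySem.Dict.empty).getD c 0 =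
      cnt5 c (([0, 1, 2, 3, 4] : List Int).foldl aGreenStep
        (answer.toList, guess.toList, PySem.Set.empty)).1 := by
    intro c hc
    rw [hav c]
    unfold cnt5
    rw [Nat.cast_inj]
    apply List.countP_congr
    intro k hk
    simp only [List.mem_range] at hk
    rw [hra1 k]
    by_cases hkk : answer.toList.getD k ' ' = guess.toList.getD k ' '
    · rw [if_pos ⟨⟨(k : Int), nat5mem k hk, Int.toNat_natCast k⟩, hkk⟩]
      have h1 : (answer.toList.getD k ' ' == guess.toList.getD k ' ') = true := beq_iff_eq.mpr hkk
      have h2 : ('.' == c) = false := beq_eq_false_iff_ne.mpr (fun hh => hc hh.symm)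
      simp [h1, h2]
      exact fun hh => absurd hkk hh
    · rw [if_neg (fun hh => hkk hh.2)]
      have h1 : (answer.toList.getD k ' ' == guess.toList.getD k ' ') = false :=
        beq_eq_false_iff_ne.mpr hkk
      simp [h1]
      exact fun _ => hkk
  -- unprocessed guess positions after pass 1
  have H2 : ∀ i ∈ ([0, 1, 2, 3, 4] : List Int),
      (([0, 1, 2, 3, 4] : List Int).foldl aGreenStep
        (answer.toList, guess.toList, PySem.Set.empty)).2.1.getD i.toNat ' ' =
      if (answer.toList.getD i.toNat ' ' == guess.toList.getD i.toNat ' ') then '.'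
      else guess.toList.getD i.toNat ' ' := by
    intro i hi
    rw [hrg1 i.toNat]
    by_cases hkk : answer.toList.getD i.toNat ' ' = guess.toList.getD i.toNat ' '
    · rw [if_pos ⟨⟨i, hi, rfl⟩, hkk⟩, if_pos (beq_iff_eq.mpr hkk)]
    · rw [if_neg (fun hh => hkk hh.2), if_neg (fun hh => hkk (beq_iff_eq.mp hh))]
  -- the '.'-safety dichotomy, from ¬D_
  have H5 : (([0, 1, 2, 3, 4] : List Int).foldl
        (bAvailStep answer.toList
          (([0, 1, 2, 3, 4] : List Int).map
            (fun i => PySem.List.pyGetD answer.toList i ' ' == PySem.List.pyGetD guess.toList i ' ')))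
        PySem.Dict.empty).getD '.' 0 = 0 ∨
      ∀ i ∈ ([0, 1, 2, 3, 4] : List Int),
        (answer.toList.getD i.toNat ' ' == guess.toList.getD i.toNat ' ') = false →
          guess.toList.getD i.toNat ' ' ≠ '.' := by
    rcases not_and_or.mp hnd with hP | hQ
    · right
      push_neg at hP
      intro i hi hglf
      exact hP i.toNat (mem5 i hi).2 (beq_eq_false_iff_ne.mp hglf)
    · left
      push_neg at hQ
      rw [hav '.']
      have : ((List.range 5).countP (fun k =>
          !(answer.toList.getD k ' ' == guess.toList.getD k ' ') &&
            (answer.toList.getD k ' ' == '.'))) = 0 := by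
        rw [List.countP_eq_zero]
        intro k hk
        simp only [List.mem_range] at hk
        by_cases hd : answer.toList.getD k ' ' = '.'
        · have hag : answer.toList.getD k ' ' = guess.toList.getD k ' ' := by
            by_contra hng
            exact hQ k hk hng hd
          rw [beq_iff_eq.mpr hag]
          simp
        · rw [beq_eq_false_iff_ne.mpr hd]
          simp
      rw [this]
      rfl
  -- main induction
  rw [mainSpec guess.toList
    (([0, 1, 2, 3, 4] : List Int).map
      (fun i => PySem.List.pyGetD answer.toList i ' ' == PySem.List.pyGetD guess.toList i ' '))
    (fun k => (answer.toList.getD k ' ' == guess.toList.getD k ' ')) Hgr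
    ([0, 1, 2, 3, 4] : List Int) (by decide) hbd5
    (([0, 1, 2, 3, 4] : List Int).foldl aGreenStep
      (answer.toList, guess.toList, PySem.Set.empty)).1
    (([0, 1, 2, 3, 4] : List Int).foldl aGreenStep
      (answer.toList, guess.toList, PySem.Set.empty)).2.1
    PySem.Set.empty _ []
    (by rw [len1]; exact ha) (by rw [len2]; exact hg) H1 H2
    (by intro i _; simp [PySem.Set.empty]) H5]
  rw [List.nil_append]
  apply List.map_congr_left
  intro i hi
  obtain ⟨hi0, hi5⟩ := mem5 i hi
  have hGi : PySem.Set.contains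
      (([0, 1, 2, 3, 4] : List Int).foldl aGreenStep
        (answer.toList, guess.toList, PySem.Set.empty)).2.2 i =
      (answer.toList.getD i.toNat ' ' == guess.toList.getD i.toNat ' ') := by
    rw [Bool.eq_iff_iff, PySem.Set.contains_iff, hG i, beq_iff_eq]
    constructor
    · rintro (hx | ⟨_, he⟩)
      · simp [PySem.Set.empty] at hx
      · exact he
    · intro he
      exact Or.inr ⟨hi, he⟩
  rw [hGi]
  by_cases hgl : (answer.toList.getD i.toNat ' ' == guess.toList.getD i.toNat ' ') = true
  · rw [if_pos hgl, if_pos hgl]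
  · rw [if_neg hgl, if_neg hgl]
    by_cases hm : i ∈ (([0, 1, 2, 3, 4] : List Int).foldl aYellowStep
        ((([0, 1, 2, 3, 4] : List Int).foldl aGreenStep
          (answer.toList, guess.toList, PySem.Set.empty)).1,
         (([0, 1, 2, 3, 4] : List Int).foldl aGreenStep
          (answer.toList, guess.toList, PySem.Set.empty)).2.1,
         PySem.Set.empty)).2.2
    · rw [if_pos ((PySem.Set.contains_iff _ _).mpr hm), if_pos hm]
    · rw [if_neg (fun hh => hm ((PySem.Set.contains_iff _ _).mp hh)), if_neg hm]

theorem getColours_changed : Claim_changed_getColours := by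
  unfold Claim_changed_getColours; decide

set_option maxHeartbeats 2000000 in
theorem getColours_tight : Claim_exact_getColours := by
  unfold Claim_exact_getColours Pre_getColours D_getColours
  intro answer guess _ hpre hD
  obtain ⟨ha, hg⟩ := hpre
  unfold getColours getColours_alt
  rw [colourFold]
  simp only [range5]
  obtain ⟨⟨len1, len2⟩, hra1, hrg1, hG⟩ :=
    pass1Spec ([0, 1, 2, 3, 4] : List Int) (by decide)
      (by intro i hi; exact (mem5 i hi).1) answer.toList guess.toList PySem.Set.empty
      (by intro i hi; exact ⟨by have := (mem5 i hi).2; omega, by have := (mem5 i hi).2; omega⟩)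
  have Hgr : ∀ k, k < 5 →
      (([0, 1, 2, 3, 4] : List Int).map
        (fun i => PySem.List.pyGetD answer.toList i ' ' == PySem.List.pyGetD guess.toList i ' ')).getD k false =
      (answer.toList.getD k ' ' == guess.toList.getD k ' ') := by
    have h := fun k hk => greenSpec answer.toList guess.toList k hk
    simpa only [range5] using h
  have hav : ∀ c : Char,
      (([0, 1, 2, 3, 4] : List Int).foldl
        (bAvailStep answer.toList
          (([0, 1, 2, 3, 4] : List Int).map
            (fun i => PySem.List.pyGetD answer.toList i ' ' == PySem.List.pyGetD guess.toList i ' ')))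
        PySem.Dict.empty).getD c 0 =
      (((List.range 5).countP (fun k =>
        !(answer.toList.getD k ' ' == guess.toList.getD k ' ') &&
          (answer.toList.getD k ' ' == c))) : Int) := by
    intro c
    rw [availSpec _ _ ([0, 1, 2, 3, 4] : List Int) (by intro i hi; exact (mem5 i hi).1)
      PySem.Dict.empty c]
    have hcongr : (([0, 1, 2, 3, 4] : List Int).countP (fun i =>
        !((([0, 1, 2, 3, 4] : List Int).map
            (fun i => PySem.List.pyGetD answer.toList i ' ' == PySem.List.pyGetD guess.toList i ' ')).getD i.toNat false) &&
          (answer.toList.getD i.toNat ' ' == c))) =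
        ((List.range 5).countP (fun k =>
          !(answer.toList.getD k ' ' == guess.toList.getD k ' ') &&
            (answer.toList.getD k ' ' == c))) := by
      simp only [show (List.range 5) = [0, 1, 2, 3, 4] from rfl, List.countP_cons,
        List.countP_nil, show ((0 : Int)).toNat = 0 from rfl, show ((1 : Int)).toNat = 1 from rfl,
        show ((2 : Int)).toNat = 2 from rfl, show ((3 : Int)).toNat = 3 from rfl,
        show ((4 : Int)).toNat = 4 from rfl, Hgr 0 (by omega), Hgr 1 (by omega),
        Hgr 2 (by omega), Hgr 3 (by omega), Hgr 4 (by omega)]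
    rw [hcongr]
    simp
  have H1 : ∀ c : Char, c ≠ '.' →
      (([0, 1, 2, 3, 4] : List Int).foldl
        (bAvailStep answer.toList
          (([0, 1, 2, 3, 4] : List Int).map
            (fun i => PySem.List.pyGetD answer.toList i ' ' == PySem.List.pyGetD guess.toList i ' ')))
        PySem.Dict.empty).getD c 0 =
      cnt5 c (([0, 1, 2, 3, 4] : List Int).foldl aGreenStep
        (answer.toList, guess.toList, PySem.Set.empty)).1 := by
    intro c hc
    rw [hav c]
    unfold cnt5
    rw [Nat.cast_inj]
    apply List.countP_congr
    intro k hk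
    simp only [List.mem_range] at hk
    rw [hra1 k]
    by_cases hkk : answer.toList.getD k ' ' = guess.toList.getD k ' '
    · rw [if_pos ⟨⟨(k : Int), nat5mem k hk, Int.toNat_natCast k⟩, hkk⟩]
      have h1 : (answer.toList.getD k ' ' == guess.toList.getD k ' ') = true := beq_iff_eq.mpr hkk
      have h2 : ('.' == c) = false := beq_eq_false_iff_ne.mpr (fun hh => hc hh.symm)
      simp [h1, h2]
      exact fun hh => absurd hkk hh
    · rw [if_neg (fun hh => hkk hh.2)]
      have h1 : (answer.toList.getD k ' ' == guess.toList.getD k ' ') = false :=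
        beq_eq_false_iff_ne.mpr hkk
      simp [h1]
      exact fun _ => hkk
  have H2 : ∀ i ∈ ([0, 1, 2, 3, 4] : List Int),
      (([0, 1, 2, 3, 4] : List Int).foldl aGreenStep
        (answer.toList, guess.toList, PySem.Set.empty)).2.1.getD i.toNat ' ' =
      if (answer.toList.getD i.toNat ' ' == guess.toList.getD i.toNat ' ') then '.'
      else guess.toList.getD i.toNat ' ' := by
    intro i hi
    rw [hrg1 i.toNat]
    by_cases hkk : answer.toList.getD i.toNat ' ' = guess.toList.getD i.toNat ' '
    · rw [if_pos ⟨⟨i, hi, rfl⟩, hkk⟩, if_pos (beq_iff_eq.mpr hkk)]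
    · rw [if_neg (fun hh => hkk hh.2), if_neg (fun hh => hkk (beq_iff_eq.mp hh))]
  have hpos : 0 < (([0, 1, 2, 3, 4] : List Int).foldl
        (bAvailStep answer.toList
          (([0, 1, 2, 3, 4] : List Int).map
            (fun i => PySem.List.pyGetD answer.toList i ' ' == PySem.List.pyGetD guess.toList i ' ')))
        PySem.Dict.empty).getD '.' 0 := by
    obtain ⟨j, hj5, hne, hdj⟩ := hD.2
    rw [hav '.']
    have : 0 < ((List.range 5).countP (fun k =>
        !(answer.toList.getD k ' ' == guess.toList.getD k ' ') &&
          (answer.toList.getD k ' ' == '.'))) := by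
      rw [List.countP_pos_iff]
      refine ⟨j, List.mem_range.mpr hj5, ?_⟩
      rw [beq_eq_false_iff_ne.mpr hne, beq_iff_eq.mpr hdj]
      rfl
    exact_mod_cast this
  have hdotL : ∃ i ∈ ([0, 1, 2, 3, 4] : List Int),
      (answer.toList.getD i.toNat ' ' == guess.toList.getD i.toNat ' ') = false ∧
        guess.toList.getD i.toNat ' ' = '.' := by
    obtain ⟨i, hi5, hne, hdi⟩ := hD.1
    refine ⟨(i : Int), nat5mem i hi5, ?_, ?_⟩
    · rw [Int.toNat_natCast]
      exact beq_eq_false_iff_ne.mpr hne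
    · rw [Int.toNat_natCast]
      exact hdi
  have hdiv := bDiverge guess.toList
    (([0, 1, 2, 3, 4] : List Int).map
      (fun i => PySem.List.pyGetD answer.toList i ' ' == PySem.List.pyGetD guess.toList i ' '))
    (fun k => (answer.toList.getD k ' ' == guess.toList.getD k ' ')) Hgr
    ([0, 1, 2, 3, 4] : List Int) (by decide) (fun i hi => mem5 i hi)
    (([0, 1, 2, 3, 4] : List Int).foldl aGreenStep
      (answer.toList, guess.toList, PySem.Set.empty)).1
    (([0, 1, 2, 3, 4] : List Int).foldl aGreenStep
      (answer.toList, guess.toList, PySem.Set.empty)).2.1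
    PySem.Set.empty _ []
    (by rw [len1]; exact ha) (by rw [len2]; exact hg) H1 H2
    (by intro i _; simp [PySem.Set.empty]) hpos hdotL
  rw [List.nil_append] at hdiv
  have hmapeq : (([0, 1, 2, 3, 4] : List Int).map
      (fun i => if PySem.Set.contains (([0, 1, 2, 3, 4] : List Int).foldl aGreenStep
          (answer.toList, guess.toList, PySem.Set.empty)).2.2 i then (2 : Int)
        else if PySem.Set.contains (([0, 1, 2, 3, 4] : List Int).foldl aYellowStep
            ((([0, 1, 2, 3, 4] : List Int).foldl aGreenStep
              (answer.toList, guess.toList, PySem.Set.empty)).1,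
             (([0, 1, 2, 3, 4] : List Int).foldl aGreenStep
              (answer.toList, guess.toList, PySem.Set.empty)).2.1,
             PySem.Set.empty)).2.2 i then 1 else 0)) =
      (([0, 1, 2, 3, 4] : List Int).map
        (fun i => if (answer.toList.getD i.toNat ' ' == guess.toList.getD i.toNat ' ') then (2 : Int)
          else if i ∈ (([0, 1, 2, 3, 4] : List Int).foldl aYellowStep
              ((([0, 1, 2, 3, 4] : List Int).foldl aGreenStep
                (answer.toList, guess.toList, PySem.Set.empty)).1,
               (([0, 1, 2, 3, 4] : List Int).foldl aGreenStep
                (answer.toList, guess.toList, PySem.Set.empty)).2.1,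
               PySem.Set.empty)).2.2 then 1 else 0)) := by
    apply List.map_congr_left
    intro i hi
    obtain ⟨hi0, hi5⟩ := mem5 i hi
    have hGi : PySem.Set.contains
        (([0, 1, 2, 3, 4] : List Int).foldl aGreenStep
          (answer.toList, guess.toList, PySem.Set.empty)).2.2 i =
        (answer.toList.getD i.toNat ' ' == guess.toList.getD i.toNat ' ') := by
      rw [Bool.eq_iff_iff, PySem.Set.contains_iff, hG i, beq_iff_eq]
      constructor
      · rintro (hx | ⟨_, he⟩)
        · simp [PySem.Set.empty] at hx
        · exact he
      · intro he
        exact Or.inr ⟨hi, he⟩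
    rw [hGi]
    by_cases hgl : (answer.toList.getD i.toNat ' ' == guess.toList.getD i.toNat ' ') = true
    · rw [if_pos hgl, if_pos hgl]
    · rw [if_neg hgl, if_neg hgl]
      by_cases hm : i ∈ (([0, 1, 2, 3, 4] : List Int).foldl aYellowStep
          ((([0, 1, 2, 3, 4] : List Int).foldl aGreenStep
            (answer.toList, guess.toList, PySem.Set.empty)).1,
           (([0, 1, 2, 3, 4] : List Int).foldl aGreenStep
            (answer.toList, guess.toList, PySem.Set.empty)).2.1,
           PySem.Set.empty)).2.2
      · rw [if_pos ((PySem.Set.contains_iff _ _).mpr hm), if_pos hm]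
      · rw [if_neg (fun hh => hm ((PySem.Set.contains_iff _ _).mp hh)), if_neg hm]
  rw [hmapeq]
  exact fun hc => hdiv hc.symm
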